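-- pv_equiv track=rewrite | github.com/dhrumil2312/RNAWebsite_v2 | QLRNA/Extract_UBP.py | type_2_ubp
-- ===== SOURCE A (Python) =====
-- def type_2_ubp(dp):
--     ubp_info = []
--     candi_pos_list = []
--     for i in range(len(dp)):
--         if dp[i] == ')':
--             candi_pos_list.append(i)
--     if len(candi_pos_list) <= 1:
--         return ubp_info
--     else:
--         for i in range(len(candi_pos_list) - 1):
--             st_i = candi_pos_list[i]
--             ed_i = candi_pos_list[i+1]
--             if ed_i - st_i > 1 and '(' not in dp[st_i+1:ed_i]:
--                 ubp_info.append([st_i,ed_i])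
--         return ubp_info
-- ===== SOURCE B (Python) =====
-- def type_2_ubp(dp):
--     # Single left-to-right pass (no candidate list, no slicing): remember the
--     # previous ')' position and whether a '(' has been seen since it; emit
--     # [prev, i] when another ')' arrives with gap > 1 and no '(' in between.
--     res = []
--     prev = -1
--     seen_open = False
--     for i, ch in enumerate(dp):
--         if ch == ')':
--             if prev >= 0 and i - prev > 1 and not seen_open:
--                 res.append([prev, i])
--             prev = i
--             seen_open = False
--         elif ch == '(':
--             seen_open = True
--     return res
-- ===== Notes on version B (the rewrite author's own statement) =====
-- stated objective: alternative
-- what changed: A collects all ')' positions and then rescans the substring between each adjacent pair for '('; B makes a single left-to-right pass remembering the previous ')' position and a flag for whether a '(' was seen since it, so the candidate list and the per-pair substring scans disappear.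
import Mathlib
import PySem

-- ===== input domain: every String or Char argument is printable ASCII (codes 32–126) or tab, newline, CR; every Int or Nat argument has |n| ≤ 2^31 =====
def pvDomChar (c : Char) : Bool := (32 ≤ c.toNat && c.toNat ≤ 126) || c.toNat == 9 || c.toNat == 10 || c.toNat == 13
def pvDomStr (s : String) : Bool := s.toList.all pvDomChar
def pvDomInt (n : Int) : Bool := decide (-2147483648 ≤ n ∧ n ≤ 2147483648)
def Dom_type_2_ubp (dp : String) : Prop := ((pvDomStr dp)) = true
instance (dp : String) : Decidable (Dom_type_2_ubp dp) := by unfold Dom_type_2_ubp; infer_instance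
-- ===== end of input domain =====

-- B replaces A's two-phase candidate-list + per-pair slice scan by a single left-to-right
-- pass remembering the previous ')' and whether a '(' was seen since it (alternative algorithm).

-- ===== PORT A =====
def type_2_ubp (dp : String) : List (List Int) :=
  let cs := dp.toList
  let candi : List Int :=
    (PySem.List.pyRange 0 (cs.length : Int) 1).foldl
      (fun acc i => if PySem.List.pyGetD cs i ' ' = ')' then acc ++ [i] else acc) []
  if candi.length ≤ 1 then []
  else
    (PySem.List.pyRange 0 ((candi.length : Int) - 1) 1).foldl
      (fun acc i =>
        let st := PySem.List.pyGetD candi i 0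
        let ed := PySem.List.pyGetD candi (i + 1) 0
        if 1 < ed - st ∧ '(' ∉ PySem.List.slice cs (some (st + 1)) (some ed)
        then acc ++ [[st, ed]] else acc) []

-- ===== PORT B =====
def type_2_ubp_alt (dp : String) : List (List Int) :=
  (dp.toList.zipIdx.foldl
    (fun (s : List (List Int) × Int × Bool) (p : Char × Nat) =>
      let res := s.1; let prev := s.2.1; let seen := s.2.2
      let ch := p.1; let i : Int := (p.2 : Int)
      if ch = ')' then
        (res ++ (if 0 ≤ prev ∧ 1 < i - prev ∧ seen = false then [[prev, i]] else []),
         i, false)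
      else if ch = '(' then (res, prev, true)
      else (res, prev, seen))
    ([], -1, false)).1

-- ===== PRECONDITION & SPEC =====
def Spec_type_2_ubp (dp : String) (out : List (List Int)) : Prop := out = type_2_ubp_alt dp
instance (dp : String) (out : List (List Int)) : Decidable (Spec_type_2_ubp dp out) := by unfold Spec_type_2_ubp; infer_instance

-- ===== CLAIM (what is proved, stated in full; the proofs are below) =====
def Claim_equal_type_2_ubp : Prop := ∀ (dp : String), Dom_type_2_ubp dp → Spec_type_2_ubp dp (type_2_ubp dp)

-- ===== LEMMAS AND PROOFS =====

/-- positions of `')'` in `cs`, indices starting at `k` -/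
def candiOf : List Char → Int → List Int
  | [], _ => []
  | c :: cs, k => (if c = ')' then [k] else []) ++ candiOf cs (k + 1)

/-- A's pair loop as structural recursion on the candidate list (slices in the full `cs`). -/
def pairsGo (cs : List Char) : List Int → List (List Int)
  | [] => []
  | [_] => []
  | st :: ed :: rest =>
    (if 1 < ed - st ∧ '(' ∉ PySem.List.slice cs (some (st + 1)) (some ed)
     then [[st, ed]] else []) ++ pairsGo cs (ed :: rest)

/-- B's loop as structural recursion (no accumulator). -/
def bGo : List Char → Int → Int → Bool → List (List Int)
  | [], _, _, _ => []
  | c :: cs, i, prev, seen =>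
    if c = ')' then
      (if 0 ≤ prev ∧ 1 < i - prev ∧ seen = false then [[prev, i]] else [])
        ++ bGo cs (i + 1) i false
    else bGo cs (i + 1) prev (seen || c = '(')

def consCandi (prev : Int) (l : List Int) : List Int :=
  if 0 ≤ prev then prev :: l else l

theorem candi_fold (suf full : List Char) : ∀ (k : Nat) (acc : List Int),
    full.drop k = suf →
    (PySem.List.pyRange (k : Int) (full.length : Int) 1).foldl
      (fun acc i => if PySem.List.pyGetD full i ' ' = ')' then acc ++ [i] else acc) acc
      = acc ++ candiOf suf (k : Int) := by
  induction suf with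
  | nil =>
    intro k acc h
    have hk : full.length ≤ k := by
      by_contra hlt
      simp [List.drop_eq_nil_iff] at h
      omega
    rw [PySem.List.pyRange_one_eq_nil (by exact_mod_cast hk)]
    simp [candiOf]
  | cons c suf ih =>
    intro k acc h
    have hk : k < full.length := by
      by_contra hlt
      rw [List.drop_eq_nil_iff.mpr (by omega)] at h
      simp at h
    have hget : full[k]? = some c := by
      have := @List.getElem?_drop _ full k 0
      rw [h] at this
      simpa using this.symm
    have hgetD : PySem.List.pyGetD full (k : Int) ' ' = c := by
      rw [PySem.List.pyGetD_natCast, List.getD_eq_getElem?_getD, hget]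
      rfl
    have hdrop : full.drop (k + 1) = suf := by
      have : (full.drop k).drop 1 = full.drop (k + 1) := by
        rw [List.drop_drop]
      rw [← this, h]
      rfl
    rw [PySem.List.pyRange_one_cons (by exact_mod_cast hk)]
    simp only [List.foldl_cons, hgetD]
    have hcast : ((k + 1 : Nat) : Int) = (k : Int) + 1 := by omega
    by_cases hc : c = ')'
    · have ih' := ih (k + 1) (acc ++ [(k : Int)]) hdrop
      rw [hcast] at ih'
      rw [if_pos hc, ih']
      simp [candiOf, hc]
    · have ih' := ih (k + 1) acc hdrop
      rw [hcast] at ih'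
      rw [if_neg hc, ih']
      simp [candiOf, hc]

theorem adj_fold (cs : List Char) (l : List Int) (suf : List Int) : ∀ (k : Nat) (acc : List (List Int)),
    l.drop k = suf →
    (PySem.List.pyRange (k : Int) ((l.length : Int) - 1) 1).foldl
      (fun acc i =>
        let st := PySem.List.pyGetD l i 0
        let ed := PySem.List.pyGetD l (i + 1) 0
        if 1 < ed - st ∧ '(' ∉ PySem.List.slice cs (some (st + 1)) (some ed)
        then acc ++ [[st, ed]] else acc) acc
      = acc ++ pairsGo cs suf := by
  induction suf with
  | nil =>
    intro k acc h
    have hk : l.length ≤ k := by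
      by_contra hlt
      simp [List.drop_eq_nil_iff] at h
      omega
    rw [PySem.List.pyRange_one_eq_nil (by omega)]
    simp [pairsGo]
  | cons st rest ih =>
    intro k acc h
    match rest, ih with
    | [], _ =>
      have hk : l.length = k + 1 := by
        have := congrArg List.length h
        simp at this
        omega
      rw [PySem.List.pyRange_one_eq_nil (by omega)]
      simp [pairsGo]
    | ed :: rest, ih =>
      have hlen : k + 2 ≤ l.length := by
        have := congrArg List.length h
        simp at this
        omega
      have hget0 : l[k]? = some st := by
        have := @List.getElem?_drop _ l k 0
        rw [h] at this
        simpa using this.symm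
      have hget1 : l[k + 1]? = some ed := by
        have := @List.getElem?_drop _ l k 1
        rw [h] at this
        simpa using this.symm
      have hst : PySem.List.pyGetD l (k : Int) 0 = st := by
        rw [PySem.List.pyGetD_natCast, List.getD_eq_getElem?_getD, hget0]; rfl
      have hcast : ((k + 1 : Nat) : Int) = (k : Int) + 1 := by omega
      have hed : PySem.List.pyGetD l ((k : Int) + 1) 0 = ed := by
        rw [← hcast, PySem.List.pyGetD_natCast, List.getD_eq_getElem?_getD, hget1]; rfl
      have hdrop : l.drop (k + 1) = ed :: rest := by
        have h2 : (l.drop k).drop 1 = l.drop (k + 1) := by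
          rw [List.drop_drop]
        rw [← h2, h]
        rfl
      rw [PySem.List.pyRange_one_cons (by omega)]
      simp only [List.foldl_cons, hst, hed]
      by_cases hcond : 1 < ed - st ∧ '(' ∉ PySem.List.slice cs (some (st + 1)) (some ed)
      · have ih' := ih (k + 1) (acc ++ [[st, ed]]) hdrop
        rw [hcast] at ih'
        rw [if_pos hcond, ih']
        simp [pairsGo, hcond]
      · have ih' := ih (k + 1) acc hdrop
        rw [hcast] at ih'
        rw [if_neg hcond, ih']
        simp [pairsGo, hcond]

theorem slice_prefix (pre suf : List Char) (prev : Int) (h0 : 0 ≤ prev)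
    (h1 : (prev + 1).toNat ≤ pre.length) :
    PySem.List.slice (pre ++ suf) (some (prev + 1)) (some (pre.length : Int))
      = pre.drop (prev + 1).toNat := by
  rw [PySem.List.slice_toNat _ (by omega) (by omega)]
  rw [List.drop_append_of_le_length h1]
  have hlen : (pre.drop (prev + 1).toNat).length = (pre.length : Int).toNat - (prev + 1).toNat := by
    simp
  rw [← hlen, List.take_left]

theorem bGo_cons_close (cs : List Char) (i prev : Int) (seen : Bool) :
    bGo (')' :: cs) i prev seen
      = (if 0 ≤ prev ∧ 1 < i - prev ∧ seen = false then [[prev, i]] else [])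
          ++ bGo cs (i + 1) i false := by
  simp [bGo]

theorem bGo_cons_other (c : Char) (cs : List Char) (i prev : Int) (seen : Bool) (hc : ¬ c = ')') :
    bGo (c :: cs) i prev seen = bGo cs (i + 1) prev (seen || decide (c = '(')) := by
  simp [bGo, hc]

theorem candiOf_cons_close (cs : List Char) (k : Int) :
    candiOf (')' :: cs) k = k :: candiOf cs (k + 1) := by
  simp [candiOf]

theorem candiOf_cons_other (c : Char) (cs : List Char) (k : Int) (hc : ¬ c = ')') :
    candiOf (c :: cs) k = candiOf cs (k + 1) := by
  simp [candiOf, hc]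

theorem consCandi_nonneg (prev : Int) (l : List Int) (h : 0 ≤ prev) :
    consCandi prev l = prev :: l := if_pos h

/-- core: B's pass equals A's pair scan, with the loop state explained by the prefix. -/
theorem core (suf : List Char) : ∀ (pre : List Char) (prev : Int) (seen : Bool),
    (prev = -1 ∨
      (0 ≤ prev ∧ (prev + 1).toNat ≤ pre.length ∧
        seen = decide ('(' ∈ pre.drop (prev + 1).toNat))) →
    bGo suf (pre.length : Int) prev seen
      = pairsGo (pre ++ suf) (consCandi prev (candiOf suf (pre.length : Int))) := by
  induction suf with
  | nil =>
    intro pre prev seen _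
    simp only [bGo, candiOf, consCandi]
    split <;> simp [pairsGo]
  | cons c suf ih =>
    intro pre prev seen hinv
    have hpre : ((pre ++ [c]).length : Int) = (pre.length : Int) + 1 := by
      simp
    by_cases hc : c = ')'
    · subst hc
      have hstep := ih (pre ++ [')']) (pre.length : Int) false
        (Or.inr ⟨by omega, by simp, by
          have h2 : ((pre.length : Int) + 1).toNat = pre.length + 1 := by omega
          rw [h2]; simp⟩)
      rw [hpre, consCandi_nonneg _ _ (by omega),
        (by simp : (pre ++ [')']) ++ suf = pre ++ (')' :: suf))] at hstep
      rw [bGo_cons_close, hstep, candiOf_cons_close]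
      rcases hinv with hneg | ⟨h0, h1, hseen⟩
      · subst hneg
        simp [consCandi]
      · rw [consCandi_nonneg _ _ h0]
        simp only [pairsGo]
        have hsl : PySem.List.slice (pre ++ ')' :: suf) (some (prev + 1)) (some (pre.length : Int))
            = pre.drop (prev + 1).toNat := slice_prefix pre (')' :: suf) prev h0 h1
        rw [hsl]
        congr 1
        by_cases hgap : 1 < (pre.length : Int) - prev
        · by_cases hmem : '(' ∈ pre.drop (prev + 1).toNat
          · have hs : seen = true := by rw [hseen]; simp [hmem]
            simp [hs, hgap, hmem]
          · have hs : seen = false := by rw [hseen]; simp [hmem]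
            simp [hs, hgap, hmem, h0]
        · simp [hgap]
    · have hstep := ih (pre ++ [c]) prev (seen || decide (c = '('))
        (by
          rcases hinv with hneg | ⟨h0, h1, hseen⟩
          · exact Or.inl hneg
          · refine Or.inr ⟨h0, by simp; omega, ?_⟩
            rw [List.drop_append_of_le_length h1, hseen]
            by_cases hp : c = '('
            · simp [hp]
            · have hp' : ¬ ('(' = c) := fun h => hp h.symm
              simp [hp, hp'])
      rw [hpre, (by simp : (pre ++ [c]) ++ suf = pre ++ (c :: suf))] at hstep
      rw [bGo_cons_other _ _ _ _ _ hc, hstep, candiOf_cons_other _ _ _ hc]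

theorem b_fold (cs : List Char) : ∀ (k : Nat) (res : List (List Int)) (prev : Int) (seen : Bool),
    ((cs.zipIdx k).foldl
      (fun (s : List (List Int) × Int × Bool) (p : Char × Nat) =>
        let res := s.1; let prev := s.2.1; let seen := s.2.2
        let ch := p.1; let i : Int := (p.2 : Int)
        if ch = ')' then
          (res ++ (if 0 ≤ prev ∧ 1 < i - prev ∧ seen = false then [[prev, i]] else []),
           i, false)
        else if ch = '(' then (res, prev, true)
        else (res, prev, seen))
      (res, prev, seen)).1 = res ++ bGo cs (k : Int) prev seen := by
  induction cs with
  | nil => intro k res prev seen; simp [bGo]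
  | cons c cs ih =>
    intro k res prev seen
    simp only [List.zipIdx_cons, List.foldl_cons]
    have hcast : ((k + 1 : Nat) : Int) = (k : Int) + 1 := by omega
    by_cases hc : c = ')'
    · subst hc
      rw [if_pos rfl]
      have ih' := ih (k + 1)
        (res ++ if 0 ≤ prev ∧ 1 < (k : Int) - prev ∧ seen = false then [[prev, (k : Int)]] else [])
        (k : Int) false
      rw [hcast] at ih'
      rw [ih', bGo_cons_close]
      simp
    · rw [if_neg hc]
      by_cases hp : c = '('
      · subst hp
        rw [if_pos rfl]
        have ih' := ih (k + 1) res prev true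
        rw [hcast] at ih'
        rw [ih', bGo_cons_other _ _ _ _ _ (by decide)]
        simp
      · rw [if_neg hp]
        have ih' := ih (k + 1) res prev seen
        rw [hcast] at ih'
        rw [ih', bGo_cons_other _ _ _ _ _ hc]
        simp [hp]

theorem pairsGo_nil_of_short (cs : List Char) (l : List Int) (h : l.length ≤ 1) :
    pairsGo cs l = [] := by
  match l, h with
  | [], _ => rfl
  | [_], _ => rfl

theorem A_as_pairs (dp : String) :
    type_2_ubp dp = pairsGo dp.toList (candiOf dp.toList 0) := by
  simp only [type_2_ubp]
  have hc := candi_fold dp.toList dp.toList 0 [] (by simp)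
  simp only [Nat.cast_zero, List.nil_append] at hc
  rw [hc]
  split
  · next h => rw [pairsGo_nil_of_short _ _ h]
  · have ha := adj_fold dp.toList (candiOf dp.toList 0) (candiOf dp.toList 0) 0 [] (by simp)
    simp only [Nat.cast_zero, List.nil_append] at ha
    rw [ha]

theorem B_as_go (dp : String) :
    type_2_ubp_alt dp = bGo dp.toList 0 (-1) false := by
  simp only [type_2_ubp_alt]
  have hb := b_fold dp.toList 0 [] (-1) false
  simp only [Nat.cast_zero, List.nil_append] at hb
  rw [hb]

-- ===== VERDICT (by name: the statement is the Claim_ definition above) =====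
theorem type_2_ubp_spec : Claim_equal_type_2_ubp := by
  intro dp _
  unfold Spec_type_2_ubp
  rw [A_as_pairs, B_as_go]
  have hcore := core dp.toList [] (-1) false (Or.inl rfl)
  simp only [List.length_nil, Nat.cast_zero, List.nil_append] at hcore
  rw [hcore]
  simp [consCandi]
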